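-- pv_equiv track=rewrite | github.com/Clinical-Virology-Unit/RecMpox | recmpox/diagnostic_snp.py | get_runs_and_breakpoints
-- ===== SOURCE A (Python) =====
-- from typing import Dict, List, Optional, Tuple
--
-- def get_runs_and_breakpoints(
--     positions_allegiances: List[Tuple[int, str]],
--     diagnostic_snp_positions: List[int],
--     min_consecutive: int = 1,
-- ) -> Tuple[List[Tuple[int, int, str, int]], List[Tuple[int, int, str, str]]]:
--     """
--     Build runs of consecutive ia/ib along diagnostic SNPs; "other" (ambiguous) ends a run.
--     Only call a breakpoint when *both* the run before and the run after have >= min_consecutive SNPs.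
--     If min_consecutive is 1, all runs are considered (no consecutive-SNP filtering). SNPs classified
--     as "other" are ignored for run boundaries.
--
--     Returns:
--         runs: list of (start_pos, end_pos, clade, n_snps) with clade in ("ia", "ib").
--         breakpoints: list of (pos_after_break, start_pos_next_run, clade_before, clade_after).
--     """
--     snp_positions = set(diagnostic_snp_positions)
--     # Keep only SNP positions, sorted by position
--     ordered = [(p, a) for (p, a) in positions_allegiances if p in snp_positions]
--     ordered.sort(key=lambda x: x[0])
--
--     runs: List[Tuple[int, int, str, int]] = []
--     i = 0
--     while i < len(ordered):
--         pos, a = ordered[i]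
--         if a not in ("ia", "ib"):
--             i += 1
--             continue
--         start_pos = pos
--         n_snps = 1
--         i += 1
--         while i < len(ordered):
--             next_pos, next_a = ordered[i]
--             if next_a != a:
--                 break
--             n_snps += 1
--             i += 1
--         end_pos = ordered[i - 1][0]
--         runs.append((start_pos, end_pos, a, n_snps))
--
--     breakpoints: List[Tuple[int, int, str, str]] = []
--     for j in range(len(runs) - 1):
--         start_a, end_a, clade_a, n_a = runs[j]
--         start_b, end_b, clade_b, n_b = runs[j + 1]
--         if clade_a == clade_b:
--             continue
--         # Breakpoint only if *both* runs have >= min_consecutive SNPs (ignore single-SNP runs)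
--         if n_a >= min_consecutive and n_b >= min_consecutive:
--             breakpoints.append((end_a, start_b, clade_a, clade_b))
--
--     return (runs, breakpoints)
-- ===== SOURCE B (Python) =====
-- from typing import List, Tuple
--
--
-- def _emit_if_breakpoint(left, right, breakpoints, min_consecutive):
--     if left[2] != right[2] and left[3] >= min_consecutive and right[3] >= min_consecutive:
--         breakpoints.insert(0, (left[1], right[0], left[2], right[2]))
--
--
-- def get_runs_and_breakpoints(
--     positions_allegiances: List[Tuple[int, str]],
--     diagnostic_snp_positions: List[int],
--     min_consecutive: int = 1,
-- ) -> Tuple[List[Tuple[int, int, str, int]], List[Tuple[int, int, str, str]]]: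
--     snp_positions = set(diagnostic_snp_positions)
--     ordered = sorted(
--         [(p, a) for (p, a) in positions_allegiances if p in snp_positions],
--         key=lambda x: x[0],
--     )
--
--     runs: List[Tuple[int, int, str, int]] = []
--     breakpoints: List[Tuple[int, int, str, str]] = []
--     closed = True  # may the front run (if any) still be extended?
--     # Walk right-to-left, building both outputs back-to-front: the front run is
--     # extended in place while contiguous same-clade SNPs arrive; the moment a new
--     # run is pushed in front of it the old front run is final, so its breakpoint
--     # with its right neighbour is decided immediately.
--     for pos, a in reversed(ordered):
--         if a not in ("ia", "ib"):
--             closed = True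
--             continue
--         if not closed and runs and runs[0][2] == a:
--             _, end_pos, clade, n_snps = runs[0]
--             runs[0] = (pos, end_pos, clade, n_snps + 1)
--         else:
--             if len(runs) >= 2:
--                 _emit_if_breakpoint(runs[0], runs[1], breakpoints, min_consecutive)
--             runs.insert(0, (pos, pos, a, 1))
--         closed = False
--     if len(runs) >= 2:
--         _emit_if_breakpoint(runs[0], runs[1], breakpoints, min_consecutive)
--     return (runs, breakpoints)
-- ===== Notes on version B (the rewrite author's own statement) =====
-- stated objective: alternative
-- what changed: B traverses the sorted SNP list right-to-left, building the runs list back-to-front by extending the front run in place, and emits each breakpoint the moment the run to its left is finalized, instead of A's forward index-driven nested while-loops followed by a separate pairwise pass over runs.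
import Mathlib
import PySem

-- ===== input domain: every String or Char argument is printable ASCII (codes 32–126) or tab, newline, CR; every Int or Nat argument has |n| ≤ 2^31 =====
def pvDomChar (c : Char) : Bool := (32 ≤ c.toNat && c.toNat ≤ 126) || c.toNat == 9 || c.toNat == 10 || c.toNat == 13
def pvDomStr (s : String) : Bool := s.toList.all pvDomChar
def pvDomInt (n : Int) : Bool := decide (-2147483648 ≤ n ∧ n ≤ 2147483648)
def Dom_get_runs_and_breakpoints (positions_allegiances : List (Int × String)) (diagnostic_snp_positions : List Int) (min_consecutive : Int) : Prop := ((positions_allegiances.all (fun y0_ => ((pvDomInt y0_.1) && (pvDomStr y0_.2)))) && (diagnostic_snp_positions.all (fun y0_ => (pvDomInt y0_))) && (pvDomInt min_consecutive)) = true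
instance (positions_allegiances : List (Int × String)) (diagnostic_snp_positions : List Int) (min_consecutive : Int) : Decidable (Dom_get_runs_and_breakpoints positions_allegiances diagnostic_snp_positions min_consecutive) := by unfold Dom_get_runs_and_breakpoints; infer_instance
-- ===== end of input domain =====

-- B builds runs and breakpoints back-to-front in one right-to-left pass, instead of A's
-- forward nested while-loops plus a second pairwise pass (objective: alternative).

-- ===== PORT A =====
-- inner while: consume elements with the same allegiance, tracking end_pos and n_snps
def pvConsumeA (a : String) (endPos : Int) (n : Int) : List (Int × String) → Int × Int × List (Int × String)
  | [] => (n, endPos, [])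
  | (p, b) :: rest => if b ≠ a then (n, endPos, (p, b) :: rest) else pvConsumeA a p (n + 1) rest

theorem pvConsumeA_length_le (a : String) : ∀ (xs : List (Int × String)) (e n : Int),
    (pvConsumeA a e n xs).2.2.length ≤ xs.length := by
  intro xs
  induction xs with
  | nil => intro e n; simp [pvConsumeA]
  | cons x rest ih =>
    intro e n
    obtain ⟨p, b⟩ := x
    by_cases h : b = a
    · simp only [pvConsumeA, h]
      simp only [ne_eq, not_true_eq_false, if_false]
      exact le_trans (ih p (n + 1)) (by simp)
    · simp [pvConsumeA, h]

-- outer while over ordered, index i advancing past each run / ambiguous SNP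
def pvRunsA : List (Int × String) → List (Int × Int × String × Int)
  | [] => []
  | (pos, a) :: rest =>
    if a ≠ "ia" ∧ a ≠ "ib" then pvRunsA rest
    else
      let r := pvConsumeA a pos 1 rest
      (pos, r.2.1, a, r.1) :: pvRunsA r.2.2
termination_by xs => xs.length
decreasing_by
  · simp
  · have := pvConsumeA_length_le a rest pos 1
    simp only [List.length_cons]
    omega

-- second pass: for j in range(len(runs)-1)
def pvBpsA (m : Int) : List (Int × Int × String × Int) → List (Int × Int × String × String)
  | r1 :: r2 :: rest =>
    (if r1.2.2.1 ≠ r2.2.2.1 ∧ r1.2.2.2 ≥ m ∧ r2.2.2.2 ≥ m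
     then [(r1.2.1, r2.1, r1.2.2.1, r2.2.2.1)] else []) ++ pvBpsA m (r2 :: rest)
  | _ => []

def get_runs_and_breakpoints (positions_allegiances : List (Int × String)) (diagnostic_snp_positions : List Int) (min_consecutive : Int) : (List (Int × Int × String × Int)) × (List (Int × Int × String × String)) :=
  let snp := PySem.Set.ofList diagnostic_snp_positions
  let ordered := PySem.List.sorted (positions_allegiances.filter (fun x => PySem.Set.contains snp x.1)) (fun x => x.1) false
  let runs := pvRunsA ordered
  (runs, pvBpsA min_consecutive runs)

-- ===== PORT B =====
-- _emit_if_breakpoint: prepend the pair if both runs qualify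
def pvEmitB (m : Int) (l r : Int × Int × String × Int) (bps : List (Int × Int × String × String)) : List (Int × Int × String × String) :=
  if l.2.2.1 ≠ r.2.2.1 ∧ l.2.2.2 ≥ m ∧ r.2.2.2 ≥ m then (l.2.1, r.1, l.2.2.1, r.2.2.1) :: bps else bps

-- the insert branch: finalize the old front run (emit its breakpoint) and push a new run
def pvInsertB (m : Int) (x : Int × String) (runs : List (Int × Int × String × Int)) (bps : List (Int × Int × String × String)) : (List (Int × Int × String × Int)) × (List (Int × Int × String × String)) × Bool :=
  ((x.1, x.1, x.2, 1) :: runs,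
   (match runs with
    | r1 :: r2 :: _ => pvEmitB m r1 r2 bps
    | _ => bps),
   false)

-- one loop-body step of B (the element x is the one currently visited, right-to-left)
def pvStepB (m : Int) (x : Int × String) (st : (List (Int × Int × String × Int)) × (List (Int × Int × String × String)) × Bool) : (List (Int × Int × String × Int)) × (List (Int × Int × String × String)) × Bool :=
  if x.2 = "ia" ∨ x.2 = "ib" then
    match st.1, st.2.2 with
    | r :: rest, false =>
      if r.2.2.1 = x.2 then ((x.1, r.2.1, r.2.2.1, r.2.2.2 + 1) :: rest, st.2.1, false)
      else pvInsertB m x st.1 st.2.1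
    | _, _ => pvInsertB m x st.1 st.2.1
  else (st.1, st.2.1, true)

-- 'for pos, a in reversed(ordered)': structural recursion, the head is processed LAST
def pvLoopB (m : Int) : List (Int × String) → (List (Int × Int × String × Int)) × (List (Int × Int × String × String)) × Bool
  | [] => ([], [], true)
  | x :: xs => pvStepB m x (pvLoopB m xs)

def get_runs_and_breakpoints_alt (positions_allegiances : List (Int × String)) (diagnostic_snp_positions : List Int) (min_consecutive : Int) : (List (Int × Int × String × Int)) × (List (Int × Int × String × String)) :=
  let snp := PySem.Set.ofList diagnostic_snp_positions
  let ordered := PySem.List.sorted (positions_allegiances.filter (fun x => PySem.Set.contains snp x.1)) (fun x => x.1) false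
  let st := pvLoopB min_consecutive ordered
  -- final 'if len(runs) >= 2: _emit_if_breakpoint(runs[0], runs[1], ...)'
  (st.1,
   match st.1 with
   | r1 :: r2 :: _ => pvEmitB min_consecutive r1 r2 st.2.1
   | _ => st.2.1)

-- ===== PRECONDITION & SPEC =====
def Spec_get_runs_and_breakpoints (positions_allegiances : List (Int × String)) (diagnostic_snp_positions : List Int) (min_consecutive : Int) (out : (List (Int × Int × String × Int)) × (List (Int × Int × String × String))) : Prop := out = get_runs_and_breakpoints_alt positions_allegiances diagnostic_snp_positions min_consecutive
instance (positions_allegiances : List (Int × String)) (diagnostic_snp_positions : List Int) (min_consecutive : Int) (out : (List (Int × Int × String × Int)) × (List (Int × Int × String × String))) : Decidable (Spec_get_runs_and_breakpoints positions_allegiances diagnostic_snp_positions min_consecutive out) := by unfold Spec_get_runs_and_breakpoints; infer_instance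

-- ===== CLAIM =====
def Claim_equal_get_runs_and_breakpoints : Prop := ∀ (positions_allegiances : List (Int × String)) (diagnostic_snp_positions : List Int) (min_consecutive : Int), Dom_get_runs_and_breakpoints positions_allegiances diagnostic_snp_positions min_consecutive → Spec_get_runs_and_breakpoints positions_allegiances diagnostic_snp_positions min_consecutive (get_runs_and_breakpoints positions_allegiances diagnostic_snp_positions min_consecutive)

-- ===== LEMMAS AND PROOFS =====

-- B's closed flag after processing a suffix: false iff the suffix starts with an ia/ib SNP
def pvClosedOf : List (Int × String) → Bool
  | [] => true
  | (_, b) :: _ => !(b == "ia" || b == "ib")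

theorem pvConsumeA_eq (a : String) : ∀ (xs : List (Int × String)) (e n : Int),
    pvConsumeA a e n xs =
      (n + ((xs.takeWhile (fun x => x.2 == a)).length : Int),
       (((xs.takeWhile (fun x => x.2 == a)).getLast?).map Prod.fst).getD e,
       xs.dropWhile (fun x => x.2 == a)) := by
  intro xs
  induction xs with
  | nil => intro e n; simp [pvConsumeA]
  | cons x rest ih =>
    intro e n
    obtain ⟨p, b⟩ := x
    by_cases h : b = a
    · simp only [pvConsumeA, h, ne_eq, not_true_eq_false, if_false,
        List.takeWhile_cons, List.dropWhile_cons, beq_self_eq_true, if_true]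
      rw [ih p (n + 1)]
      refine Prod.ext ?_ (Prod.ext ?_ rfl)
      · simp; omega
      · cases htw : rest.takeWhile (fun x => x.2 == a) with
        | nil => simp
        | cons y ys =>
          have hz : ∃ z, (y :: ys).getLast? = some z := by
            cases h' : (y :: ys).getLast? with
            | none => simp at h'
            | some z => exact ⟨z, rfl⟩
          obtain ⟨z, hz⟩ := hz
          rw [List.getLast?_cons_cons, hz]
          simp
    · simp [pvConsumeA, h]

-- helper: finalizing the front run turns 'breakpoints of the tail' into 'breakpoints of all runs'
theorem pvFinalize_eq (m : Int) (rs : List (Int × Int × String × Int)) :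
    (match rs with
     | r1 :: r2 :: _ => pvEmitB m r1 r2 (pvBpsA m rs.tail)
     | _ => pvBpsA m rs.tail) = pvBpsA m rs := by
  match rs with
  | [] => simp [pvBpsA]
  | [r1] => simp [pvBpsA]
  | r1 :: r2 :: rest =>
    simp only [pvBpsA, pvEmitB, List.tail_cons]
    split_ifs <;> simp

-- A skips an ambiguous SNP
theorem pvRunsA_other (p : Int) (a : String) (xs : List (Int × String))
    (h : a ≠ "ia" ∧ a ≠ "ib") : pvRunsA ((p, a) :: xs) = pvRunsA xs := by
  conv_lhs => rw [pvRunsA]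
  rw [if_pos h]

-- A opens a single-SNP run when the next element is absent or has a different allegiance
theorem pvRunsA_new (p : Int) (a : String) (xs : List (Int × String))
    (h : ¬(a ≠ "ia" ∧ a ≠ "ib"))
    (hx : xs = [] ∨ ∃ q b t, xs = (q, b) :: t ∧ b ≠ a) :
    pvRunsA ((p, a) :: xs) = (p, p, a, 1) :: pvRunsA xs := by
  conv_lhs => rw [pvRunsA]
  rw [if_neg h]
  rcases hx with rfl | ⟨q, b, t, rfl, hb⟩
  · simp [pvConsumeA]
  · simp [pvConsumeA, hb]

-- A extends the front run when the next element has the same allegiance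
theorem pvRunsA_ext (p q : Int) (a : String) (t : List (Int × String))
    (h : ¬(a ≠ "ia" ∧ a ≠ "ib")) :
    pvRunsA ((p, a) :: (q, a) :: t) =
      match pvRunsA ((q, a) :: t) with
      | r :: rest => (p, r.2.1, r.2.2.1, r.2.2.2 + 1) :: rest
      | [] => [] := by
  conv_lhs => rw [pvRunsA]
  rw [if_neg h]
  conv_rhs => rw [pvRunsA]
  rw [if_neg h]
  simp only [pvConsumeA, ne_eq, not_true_eq_false, if_false]
  rw [pvConsumeA_eq, pvConsumeA_eq]
  simp
  omega

-- invariant of B's right-to-left loop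
theorem pvLoopB_eq (m : Int) : ∀ xs : List (Int × String),
    pvLoopB m xs = (pvRunsA xs, pvBpsA m (pvRunsA xs).tail, pvClosedOf xs) := by
  intro xs
  induction xs with
  | nil => simp [pvLoopB, pvRunsA, pvBpsA, pvClosedOf]
  | cons x xs ih =>
    obtain ⟨p, a⟩ := x
    by_cases hcl : a = "ia" ∨ a = "ib"
    · have hne : ¬(a ≠ "ia" ∧ a ≠ "ib") := by rcases hcl with h | h <;> simp [h]
      have hbcl : (a == "ia" || a == "ib") = true := by rcases hcl with h | h <;> simp [h]
      cases xs with
      | nil =>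
        rw [pvRunsA_new p a [] hne (Or.inl rfl)]
        simp [pvLoopB, pvStepB, if_pos hcl, pvInsertB, pvRunsA, pvBpsA, pvClosedOf, hbcl]
      | cons y t =>
        obtain ⟨q, b⟩ := y
        by_cases hb2 : b = "ia" ∨ b = "ib"
        · have hneb : ¬(b ≠ "ia" ∧ b ≠ "ib") := by rcases hb2 with h | h <;> simp [h]
          have hbb : (b == "ia" || b == "ib") = true := by rcases hb2 with h | h <;> simp [h]
          have hrb0 : pvRunsA ((q, b) :: t) =
              (q, (pvConsumeA b q 1 t).2.1, b, (pvConsumeA b q 1 t).1) ::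
                pvRunsA (pvConsumeA b q 1 t).2.2 := by
            conv_lhs => rw [pvRunsA]
            rw [if_neg hneb]
          obtain ⟨E, N, R, hrb⟩ : ∃ E N R, pvRunsA ((q, b) :: t) = (q, E, b, N) :: R :=
            ⟨_, _, _, hrb0⟩
          by_cases hba : b = a
          · subst hba
            have hext := pvRunsA_ext p q b t hneb
            rw [hrb] at hext
            conv_lhs => rw [pvLoopB]
            rw [ih, hrb]
            simp only [pvStepB, if_pos hcl, pvClosedOf, hbb, Bool.not_true, hext]
            simp
          · conv_lhs => rw [pvLoopB]
            rw [ih, hrb]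
            simp only [pvStepB, if_pos hcl, pvClosedOf, hbb, Bool.not_true]
            rw [if_neg hba]
            have hra := pvRunsA_new p a ((q, b) :: t) hne (Or.inr ⟨q, b, t, rfl, hba⟩)
            rw [hrb] at hra
            rw [hra]
            simp only [pvInsertB, List.tail_cons]
            have hfin := pvFinalize_eq m ((q, E, b, N) :: R)
            simp only [List.tail_cons] at hfin
            rw [hfin]
            simp [hbcl]
        · have hnb : b ≠ a := fun h => hb2 (h ▸ hcl)
          have hbf : (b == "ia" || b == "ib") = false := by
            cases hx : (b == "ia" || b == "ib") with
            | false => rfl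
            | true => exact absurd (by simpa using hx) hb2
          conv_lhs => rw [pvLoopB]
          rw [ih]
          simp only [pvClosedOf, hbf, Bool.not_false]
          simp only [pvStepB, if_pos hcl]
          have hra := pvRunsA_new p a ((q, b) :: t) hne (Or.inr ⟨q, b, t, rfl, hnb⟩)
          rw [hra]
          cases hsh : pvRunsA ((q, b) :: t) with
          | nil => simp [pvInsertB, pvBpsA, hbcl]
          | cons r1 rest =>
            simp only [pvInsertB, List.tail_cons]
            have hfin := pvFinalize_eq m (r1 :: rest)
            simp only [List.tail_cons] at hfin
            rw [hfin]
            simp [hbcl]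
    · have h1 : a ≠ "ia" ∧ a ≠ "ib" := ⟨fun h => hcl (Or.inl h), fun h => hcl (Or.inr h)⟩
      have hbcl : (a == "ia" || a == "ib") = false := by
        cases hx : (a == "ia" || a == "ib") with
        | false => rfl
        | true => exact absurd (by simpa using hx) hcl
      conv_lhs => rw [pvLoopB]
      rw [ih, pvRunsA_other p a xs h1]
      simp [pvStepB, hcl, pvClosedOf, hbcl]

-- ===== VERDICT =====
theorem get_runs_and_breakpoints_spec : Claim_equal_get_runs_and_breakpoints := by
  intro pa dsp m _
  unfold Spec_get_runs_and_breakpoints get_runs_and_breakpoints get_runs_and_breakpoints_alt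
  dsimp only
  rw [pvLoopB_eq]
  cases h : pvRunsA (PySem.List.sorted (pa.filter (fun x => PySem.Set.contains (PySem.Set.ofList dsp) x.1)) (fun x => x.1) false) with
  | nil => simp [pvBpsA]
  | cons r1 rest =>
    cases rest with
    | nil => simp [pvBpsA]
    | cons r2 rest' =>
      simp only [pvBpsA, pvEmitB, List.tail_cons]
      split_ifs <;> simp
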